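-- pv_equiv track=rewrite | github.com/shodithanukala/cineintent-ai | intent_engine.py | adjust_emotion_for_subtle_scenes
-- ===== SOURCE A (Python) =====
-- def adjust_emotion_for_subtle_scenes(text, emotion):
--     text = text.lower()
--
--     nervous_cues = [
--         "shift", "stare", "staring",
--         "avoid", "wait", "waiting",
--         "pause", "hesitate",
--         "silent", "silence",
--         "look down", "floor"
--     ]
--
--     if emotion == "neutral":
--         for cue in nervous_cues:
--             if cue in text:
--                 return "anxiety"
--
--     return emotion
-- ===== SOURCE B (Python) =====
-- def adjust_emotion_for_subtle_scenes(text, emotion):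
--     if emotion != "neutral":
--         return emotion
--
--     nervous_cues = (
--         "shift", "stare", "staring",
--         "avoid", "wait", "waiting",
--         "pause", "hesitate",
--         "silent", "silence",
--         "look down", "floor"
--     )
--
--     t = text.lower()
--     # single left-to-right pass over the text: at each position, test whether
--     # some cue starts there (position-major, instead of A's cue-major scans)
--     for i in range(len(t)):
--         if any(t.startswith(cue, i) for cue in nervous_cues):
--             return "anxiety"
--     return emotion
-- ===== Notes on version B (the rewrite author's own statement) =====
-- stated objective: alternative
-- what changed: Replaces A's eleven independent 'cue in text' substring scans (cue-major) with a single left-to-right pass over the text that at each position tests whether any cue starts there (position-major), returning on the first match.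
import Mathlib
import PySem

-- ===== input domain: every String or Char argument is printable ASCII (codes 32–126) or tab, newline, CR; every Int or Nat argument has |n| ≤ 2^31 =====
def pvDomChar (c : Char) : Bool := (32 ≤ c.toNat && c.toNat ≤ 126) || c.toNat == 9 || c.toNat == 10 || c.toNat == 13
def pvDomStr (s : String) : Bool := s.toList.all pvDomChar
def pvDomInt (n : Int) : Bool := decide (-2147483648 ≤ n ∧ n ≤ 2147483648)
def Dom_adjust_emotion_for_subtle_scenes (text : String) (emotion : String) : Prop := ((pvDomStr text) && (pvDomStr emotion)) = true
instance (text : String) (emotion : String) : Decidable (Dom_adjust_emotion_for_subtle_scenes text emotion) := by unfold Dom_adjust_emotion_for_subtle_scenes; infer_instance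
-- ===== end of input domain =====

-- B replaces A's per-cue substring scans with one position-major pass over the text (objective: alternative).

-- ===== PORT A =====
def pvCues : List String :=
  ["shift", "stare", "staring",
   "avoid", "wait", "waiting",
   "pause", "hesitate",
   "silent", "silence",
   "look down", "floor"]

-- A's 'for cue in nervous_cues: if cue in text: return "anxiety"' loop
def pvLoopA (t : String) : List String → Option String
  | [] => none
  | cue :: rest => if PySem.Str.isIn cue t then some "anxiety" else pvLoopA t rest

def adjust_emotion_for_subtle_scenes (text : String) (emotion : String) : String :=
  let t := PySem.Str.lower text
  if emotion == "neutral" then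
    match pvLoopA t pvCues with
    | some r => r
    | none => emotion
  else emotion

-- ===== PORT B =====
-- B's 'for i in range(len(t)): if any(t.startswith(cue, i) …)' loop; position i is
-- represented by the suffix t.drop i, and t.startswith(cue, i) is exactly
-- PySem.Chars.startswith (t.drop i) cue.toList.
def pvScanB (cues : List String) : List Char → Bool
  | [] => false
  | a :: rest =>
    if cues.any (fun cue => PySem.Chars.startswith (a :: rest) cue.toList) then true
    else pvScanB cues rest

def adjust_emotion_for_subtle_scenes_alt (text : String) (emotion : String) : String :=
  if emotion != "neutral" then emotion
  else
    let t := (PySem.Str.lower text).toList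
    if pvScanB pvCues t then "anxiety" else emotion

-- ===== PRECONDITION & SPEC =====
def Spec_adjust_emotion_for_subtle_scenes (text : String) (emotion : String) (out : String) : Prop := out = adjust_emotion_for_subtle_scenes_alt text emotion
instance (text : String) (emotion : String) (out : String) : Decidable (Spec_adjust_emotion_for_subtle_scenes text emotion out) := by unfold Spec_adjust_emotion_for_subtle_scenes; infer_instance

-- ===== CLAIM (what is proved, stated in full; the proofs are below) =====
def Claim_equal_adjust_emotion_for_subtle_scenes : Prop := ∀ (text : String) (emotion : String), Dom_adjust_emotion_for_subtle_scenes text emotion → Spec_adjust_emotion_for_subtle_scenes text emotion (adjust_emotion_for_subtle_scenes text emotion)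

-- ===== LEMMAS AND PROOFS =====

-- A's loop finds "anxiety" exactly when some cue is a substring (infix) of t
theorem pvLoopA_eq (t : String) (cues : List String) :
    pvLoopA t cues = if (∃ c ∈ cues, c.toList <:+: t.toList) then some "anxiety" else none := by
  induction cues with
  | nil => simp [pvLoopA]
  | cons cue rest ih =>
    simp only [pvLoopA, ih]
    by_cases h : PySem.Str.isIn cue t = true
    · have hinf := (PySem.Str.isIn_iff_infix cue t).mp h
      have hx : ∃ c ∈ cue :: rest, c.toList <:+: t.toList := ⟨cue, List.mem_cons_self, hinf⟩
      rw [if_pos h, if_pos hx]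
    · have hni : ¬ cue.toList <:+: t.toList := fun hc =>
        h ((PySem.Str.isIn_iff_infix cue t).mpr hc)
      rw [if_neg h]
      have hiff : (∃ c ∈ cue :: rest, c.toList <:+: t.toList) ↔ (∃ c ∈ rest, c.toList <:+: t.toList) := by
        constructor
        · rintro ⟨c, hc, hi⟩
          rcases List.mem_cons.mp hc with rfl | hc'
          · exact absurd hi hni
          · exact ⟨c, hc', hi⟩
        · rintro ⟨c, hc, hi⟩; exact ⟨c, List.mem_cons_of_mem _ hc, hi⟩
      rw [if_congr hiff.symm rfl rfl]

-- B's scan returns true exactly when some (nonempty) cue is an infix of s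
theorem pvScanB_iff (cues : List String) (h : ∀ c ∈ cues, c.toList ≠ []) (s : List Char) :
    pvScanB cues s = true ↔ ∃ c ∈ cues, c.toList <:+: s := by
  induction s with
  | nil =>
    simp only [pvScanB]
    constructor
    · intro h'; exact absurd h' Bool.false_ne_true
    · rintro ⟨c, hc, hinf⟩
      exact absurd (List.infix_nil.mp hinf) (h c hc)
  | cons a rest ih =>
    simp only [pvScanB]
    by_cases hp : cues.any (fun cue => PySem.Chars.startswith (a :: rest) cue.toList) = true
    · rw [if_pos hp]
      simp only [true_iff]
      rcases List.any_eq_true.mp hp with ⟨c, hc, hsw⟩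
      exact ⟨c, hc, ((PySem.Chars.startswith_iff _ _).mp hsw).isInfix⟩
    · rw [if_neg hp, ih]
      constructor
      · rintro ⟨c, hc, hinf⟩
        exact ⟨c, hc, List.infix_cons_iff.mpr (Or.inr hinf)⟩
      · rintro ⟨c, hc, hinf⟩
        rcases List.infix_cons_iff.mp hinf with hpre | hinf'
        · exact absurd (List.any_eq_true.mpr ⟨c, hc, (PySem.Chars.startswith_iff _ _).mpr hpre⟩) hp
        · exact ⟨c, hc, hinf'⟩

theorem adjust_emotion_for_subtle_scenes_spec : Claim_equal_adjust_emotion_for_subtle_scenes := by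
  intro text emotion _
  unfold Spec_adjust_emotion_for_subtle_scenes
  simp only [adjust_emotion_for_subtle_scenes, adjust_emotion_for_subtle_scenes_alt]
  have hcue : ∀ c ∈ pvCues, c.toList ≠ [] := by decide
  by_cases he : (emotion == "neutral") = true
  · have hne : ¬ ((emotion != "neutral") = true) := by simp [bne, he]
    rw [if_pos he, if_neg hne, pvLoopA_eq]
    by_cases hex : ∃ c ∈ pvCues, c.toList <:+: (PySem.Str.lower text).toList
    · rw [if_pos hex, if_pos ((pvScanB_iff pvCues hcue _).mpr hex)]
    · rw [if_neg hex, if_neg (fun hc => hex ((pvScanB_iff pvCues hcue _).mp hc))]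
  · have he' : (emotion == "neutral") = false := Bool.eq_false_iff.mpr he
    have hne : (emotion != "neutral") = true := by simp [bne, he']
    rw [if_neg he, if_pos hne]
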